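-- pv_equiv track=rewrite | github.com/W-Mirshod/Mileage-Tracker-App | app/utils.py | categorize_service_type
-- ===== SOURCE A (Python) =====
-- def categorize_service_type(service_type: str) -> str:
--     """Categorize service types for better organization."""
--     categories = {
--         "maintenance": ["oil_change", "filter_change", "fluid_check"],
--         "tires": ["tire_rotation", "tire_replacement", "tire_repair"],
--         "brakes": ["brake_service", "brake_pad_replacement"],
--         "engine": ["transmission", "cooling_system", "battery", "spark_plugs"],
--         "inspection": ["inspection", "emissions_test"],
--         "other": []
--     }
--
--     for category, types in categories.items():
--         if service_type in types:
--             return category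
--
--     return "other"
-- ===== SOURCE B (Python) =====
-- _CATEGORY_BY_TYPE = {
--     "oil_change": "maintenance",
--     "filter_change": "maintenance",
--     "fluid_check": "maintenance",
--     "tire_rotation": "tires",
--     "tire_replacement": "tires",
--     "tire_repair": "tires",
--     "brake_service": "brakes",
--     "brake_pad_replacement": "brakes",
--     "transmission": "engine",
--     "cooling_system": "engine",
--     "battery": "engine",
--     "spark_plugs": "engine",
--     "inspection": "inspection",
--     "emissions_test": "inspection",
-- }
--
--
-- def categorize_service_type(service_type: str) -> str:
--     """Categorize service types for better organization."""
--     return _CATEGORY_BY_TYPE.get(service_type, "other")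
-- ===== Notes on version B (the rewrite author's own statement) =====
-- stated objective: simpler
-- what changed: Replaced the loop over a category-to-types dict with per-category membership tests by a single precomputed inverted dict and one .get with the default category.
import Mathlib
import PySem

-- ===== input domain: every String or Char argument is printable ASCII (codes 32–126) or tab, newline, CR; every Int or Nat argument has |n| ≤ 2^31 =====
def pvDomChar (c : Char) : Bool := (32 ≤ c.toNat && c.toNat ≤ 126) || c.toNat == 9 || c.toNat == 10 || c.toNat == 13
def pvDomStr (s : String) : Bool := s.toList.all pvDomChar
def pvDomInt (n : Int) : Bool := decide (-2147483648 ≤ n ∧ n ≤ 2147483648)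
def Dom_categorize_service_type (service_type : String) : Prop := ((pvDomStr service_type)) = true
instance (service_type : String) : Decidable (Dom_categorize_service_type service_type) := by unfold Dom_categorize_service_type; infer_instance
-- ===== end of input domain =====

-- ===== PORT A =====
-- one honest line: B replaces A's loop over a category→types dict by a lookup in a precomputed inverted dict (simpler)
def pvCatLoop (s : String) : List (String × List String) → String
  | [] => "other"
  | (category, types) :: rest => if s ∈ types then category else pvCatLoop s rest

def categorize_service_type (service_type : String) : String :=
  pvCatLoop service_type
    [ ("maintenance", ["oil_change", "filter_change", "fluid_check"])
    , ("tires", ["tire_rotation", "tire_replacement", "tire_repair"])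
    , ("brakes", ["brake_service", "brake_pad_replacement"])
    , ("engine", ["transmission", "cooling_system", "battery", "spark_plugs"])
    , ("inspection", ["inspection", "emissions_test"])
    , ("other", []) ]

-- ===== PORT B =====
def pvCategoryByType : PySem.Dict String String :=
  PySem.Dict.ofList
    [ ("oil_change", "maintenance"), ("filter_change", "maintenance"), ("fluid_check", "maintenance")
    , ("tire_rotation", "tires"), ("tire_replacement", "tires"), ("tire_repair", "tires")
    , ("brake_service", "brakes"), ("brake_pad_replacement", "brakes")
    , ("transmission", "engine"), ("cooling_system", "engine"), ("battery", "engine"), ("spark_plugs", "engine")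
    , ("inspection", "inspection"), ("emissions_test", "inspection") ]

def categorize_service_type_alt (service_type : String) : String :=
  PySem.Dict.getD pvCategoryByType service_type "other"

-- ===== PRECONDITION & SPEC =====
def Spec_categorize_service_type (service_type : String) (out : String) : Prop := out = categorize_service_type_alt service_type
instance (service_type : String) (out : String) : Decidable (Spec_categorize_service_type service_type out) := by unfold Spec_categorize_service_type; infer_instance

-- ===== CLAIM (what is proved, stated in full; the proofs are below) =====
def Claim_equal_categorize_service_type : Prop := ∀ (service_type : String), Dom_categorize_service_type service_type → Spec_categorize_service_type service_type (categorize_service_type service_type)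

-- ===== LEMMAS AND PROOFS =====

-- ===== VERDICT (by name: the statement is the Claim_ definition above) =====
set_option maxHeartbeats 2000000 in
-- pvCategoryByType, a dict literal with all-distinct keys, is its pair list verbatim
theorem pvCategoryByType_eq :
    pvCategoryByType = PySem.Dict.mk
      [ ("oil_change", "maintenance"), ("filter_change", "maintenance"), ("fluid_check", "maintenance")
      , ("tire_rotation", "tires"), ("tire_replacement", "tires"), ("tire_repair", "tires")
      , ("brake_service", "brakes"), ("brake_pad_replacement", "brakes")
      , ("transmission", "engine"), ("cooling_system", "engine"), ("battery", "engine"), ("spark_plugs", "engine")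
      , ("inspection", "inspection"), ("emissions_test", "inspection") ] := by rfl

set_option maxHeartbeats 1000000 in
theorem categorize_service_type_spec : Claim_equal_categorize_service_type := by
  intro s _
  unfold Spec_categorize_service_type categorize_service_type categorize_service_type_alt
  rw [pvCategoryByType_eq]
  by_cases h : s ∈ ["oil_change", "filter_change", "fluid_check", "tire_rotation",
      "tire_replacement", "tire_repair", "brake_service", "brake_pad_replacement",
      "transmission", "cooling_system", "battery", "spark_plugs", "inspection", "emissions_test"]
  · simp only [List.mem_cons, List.not_mem_nil, or_false] at h
    rcases h with rfl|rfl|rfl|rfl|rfl|rfl|rfl|rfl|rfl|rfl|rfl|rfl|rfl|rfl <;> rfl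
  · simp only [List.mem_cons, List.not_mem_nil, or_false, not_or] at h
    obtain ⟨h1, h2, h3, h4, h5, h6, h7, h8, h9, h10, h11, h12, h13, h14⟩ := h
    simp only [pvCatLoop, PySem.Dict.getD_eq_get?_getD, PySem.Dict.get?_mk_cons, beq_iff_eq,
      List.mem_cons, List.not_mem_nil,
      h1, h2, h3, h4, h5, h6, h7, h8, h9, h10, h11, h12, h13, h14,
      Ne.symm h1, Ne.symm h2, Ne.symm h3, Ne.symm h4, Ne.symm h5, Ne.symm h6, Ne.symm h7,
      Ne.symm h8, Ne.symm h9, Ne.symm h10, Ne.symm h11, Ne.symm h12, Ne.symm h13, Ne.symm h14,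
      if_false, or_self]
    rfl
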